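-- pv_equiv track=rewrite | github.com/SoyITPro/scripts | miscellany/wordpress_sql_to_hugo_ultimate.py | split_tuples
-- ===== SOURCE A (Python) =====
-- def split_tuples(s):
--     tuples=[]; depth=0; ins=False; esc=False; start=None
--     for i,ch in enumerate(s):
--         if ins:
--             if esc: esc=False
--             elif ch=="\\": esc=True
--             elif ch=="'": ins=False
--         else:
--             if ch=="'": ins=True
--             elif ch=="(":
--                 if depth==0: start=i
--                 depth+=1
--             elif ch==")":
--                 depth-=1
--                 if depth==0 and start is not None: tuples.append(s[start:i+1])
--     return tuples
-- ===== SOURCE B (Python) =====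
-- def split_tuples(s):
--     tuples = []
--     depth = 0
--     start = None
--     i = 0
--     n = len(s)
--     while i < n:
--         ch = s[i]
--         if ch == "'":
--             i += 1
--             while i < n and s[i] != "'":
--                 i += 2 if s[i] == "\\" else 1
--             i += 1
--         else:
--             if ch == "(":
--                 if depth == 0:
--                     start = i
--                 depth += 1
--             elif ch == ")":
--                 depth -= 1
--                 if depth == 0 and start is not None:
--                     tuples.append(s[start:i+1])
--             i += 1
--     return tuples
-- ===== Notes on version B (the rewrite author's own statement) =====
-- stated objective: simpler
-- what changed: Replaces A's single for-loop with persistent in-string/escape boolean flags by an index-based while loop that keeps only depth and start, skipping each quoted string wholesale in an inner scan (advance 2 on backslash, 1 otherwise).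
import Mathlib
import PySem

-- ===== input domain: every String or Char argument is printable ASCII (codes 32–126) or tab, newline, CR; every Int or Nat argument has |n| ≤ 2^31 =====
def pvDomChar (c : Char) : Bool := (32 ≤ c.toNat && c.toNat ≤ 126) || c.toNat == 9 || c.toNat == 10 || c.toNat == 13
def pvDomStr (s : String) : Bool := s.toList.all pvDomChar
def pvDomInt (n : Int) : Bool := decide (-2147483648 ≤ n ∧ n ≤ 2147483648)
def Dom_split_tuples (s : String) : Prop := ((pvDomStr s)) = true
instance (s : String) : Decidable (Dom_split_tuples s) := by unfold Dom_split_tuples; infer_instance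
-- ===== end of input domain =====

-- B replaces A's per-character ins/esc flag machine by an index-based scan that skips each
-- quoted string as a chunk (objective: simpler state — same asymptotic cost).

-- ===== PORT A =====
-- the for-loop of A as structural recursion over the characters, carrying the same state
-- (tuples, depth, ins, esc, start); i is the enumerate index
def loopA (cs : List Char) (i : Nat) (tuples : List String) (depth : Int)
    (ins esc : Bool) (start : Option Nat) (s : String) : List String :=
  match cs with
  | [] => tuples
  | ch :: rest =>
    if ins then
      if esc then loopA rest (i+1) tuples depth ins false start s
      else if ch = '\\' then loopA rest (i+1) tuples depth ins true start s
      else if ch = '\'' then loopA rest (i+1) tuples depth false esc start s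
      else loopA rest (i+1) tuples depth ins esc start s
    else
      if ch = '\'' then loopA rest (i+1) tuples depth true esc start s
      else if ch = '(' then
        loopA rest (i+1) tuples (depth+1) ins esc (if depth = 0 then some i else start) s
      else if ch = ')' then
        loopA rest (i+1)
          (if depth - 1 = 0 then
             (match start with
              | some st => tuples ++ [PySem.Str.slice s (some (st : Int)) (some ((i : Int) + 1))]
              | none => tuples)
           else tuples)
          (depth - 1) ins esc start s
      else loopA rest (i+1) tuples depth ins esc start s

def split_tuples (s : String) : List String :=
  loopA s.toList 0 [] 0 false false none s

-- ===== PORT B =====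
-- the inner `while i < n and s[i] != "'" : i += 2 if s[i]=="\\" else 1` followed by `i += 1`,
-- on the remaining characters; returns the remaining suffix and the new index
def skipQuoted (cs : List Char) (i : Nat) : List Char × Nat :=
  match cs with
  | [] => ([], i + 1)
  | c :: rest =>
    if c = '\'' then (rest, i + 1)
    else if c = '\\' then
      match rest with
      | [] => ([], i + 3)
      | _ :: rest' => skipQuoted rest' (i + 2)
    else skipQuoted rest (i + 1)

theorem skipQuoted_length_le : ∀ (cs : List Char) (i : Nat), (skipQuoted cs i).1.length ≤ cs.length := by
  intro cs i
  induction cs, i using skipQuoted.induct <;>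
    · rw [skipQuoted.eq_def]
      try simp_all
      try omega

-- the outer `while i < n` loop of B over the remaining characters
def loopB (cs : List Char) (i : Nat) (tuples : List String) (depth : Int)
    (start : Option Nat) (s : String) : List String :=
  match cs with
  | [] => tuples
  | ch :: rest =>
    if ch = '\'' then
      loopB (skipQuoted rest (i+1)).1 (skipQuoted rest (i+1)).2 tuples depth start s
    else if ch = '(' then
      loopB rest (i+1) tuples (depth+1) (if depth = 0 then some i else start) s
    else if ch = ')' then
      loopB rest (i+1)
        (if depth - 1 = 0 then
           (match start with
            | some st => tuples ++ [PySem.Str.slice s (some (st : Int)) (some ((i : Int) + 1))]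
            | none => tuples)
         else tuples)
        (depth - 1) start s
    else loopB rest (i+1) tuples depth start s
termination_by cs.length
decreasing_by
  · exact Nat.lt_succ_of_le (skipQuoted_length_le rest (i+1))
  · simp
  · simp
  · simp

def split_tuples_alt (s : String) : List String :=
  loopB s.toList 0 [] 0 none s

-- ===== PRECONDITION & SPEC =====
def Spec_split_tuples (s : String) (out : List String) : Prop := out = split_tuples_alt s
instance (s : String) (out : List String) : Decidable (Spec_split_tuples s out) := by unfold Spec_split_tuples; infer_instance

-- ===== CLAIM (what is proved, stated in full; the proofs are below) =====
def Claim_equal_split_tuples : Prop := ∀ (s : String), Dom_split_tuples s → Spec_split_tuples s (split_tuples s)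

-- ===== LEMMAS AND PROOFS =====

-- Main invariant: outside a quoted string A's loop coincides with B's loop, and inside a
-- quoted string (with esc clear) A's flag machine coincides with B resumed after skipQuoted.
theorem loopA_eq_loopB : ∀ (n : Nat) (cs : List Char), cs.length ≤ n →
    ∀ (i : Nat) (tuples : List String) (depth : Int) (start : Option Nat) (s : String),
      loopA cs i tuples depth false false start s = loopB cs i tuples depth start s ∧
      loopA cs i tuples depth true false start s
        = loopB (skipQuoted cs i).1 (skipQuoted cs i).2 tuples depth start s := by
  intro n
  induction n with
  | zero =>
      intro cs hcs i tuples depth start s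
      have : cs = [] := List.eq_nil_of_length_eq_zero (Nat.le_zero.mp hcs)
      subst this
      constructor <;> simp [loopA, loopB, skipQuoted]
  | succ n ih =>
      intro cs hcs i tuples depth start s
      match cs with
      | [] => constructor <;> simp [loopA, loopB, skipQuoted]
      | ch :: rest =>
        have hr : rest.length ≤ n := by simp at hcs; omega
        constructor
        · -- ins = false
          by_cases hq : ch = '\''
          · rw [loopB.eq_def]; simp only [loopA, Bool.false_eq_true, if_false, if_pos hq]
            exact (ih rest hr (i+1) tuples depth start s).2
          · by_cases ho : ch = '('
            · rw [loopB.eq_def]; simp only [loopA, Bool.false_eq_true, if_false, if_neg hq, if_pos ho]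
              exact (ih rest hr (i+1) tuples (depth+1) (if depth = 0 then some i else start) s).1
            · by_cases hc : ch = ')'
              · rw [loopB.eq_def]
                simp only [loopA, Bool.false_eq_true, if_false, if_neg hq, if_neg ho, if_pos hc]
                exact (ih rest hr (i+1) _ (depth-1) start s).1
              · rw [loopB.eq_def]
                simp only [loopA, Bool.false_eq_true, if_false, if_neg hq, if_neg ho, if_neg hc]
                exact (ih rest hr (i+1) tuples depth start s).1
        · -- ins = true, esc = false
          by_cases hb : ch = '\\'
          · have hq : ¬ ch = '\'' := by subst hb; decide
            match rest with
            | [] =>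
                subst hb
                rw [loopA.eq_def]
                simp [loopA, skipQuoted, loopB]
            | c2 :: rest' =>
                have hr' : rest'.length ≤ n := by simp at hr; omega
                have hs : skipQuoted (ch :: c2 :: rest') i = skipQuoted rest' (i + 2) := by
                  rw [skipQuoted.eq_def]; simp [hb]
                have h1 : loopA (ch :: c2 :: rest') i tuples depth true false start s
                    = loopA (c2 :: rest') (i+1) tuples depth true true start s := by
                  rw [loopA.eq_def]; simp [hb]
                have h2 : loopA (c2 :: rest') (i+1) tuples depth true true start s
                    = loopA rest' (i+2) tuples depth true false start s := by
                  rw [loopA.eq_def]; simp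
                rw [h1, h2, hs]
                exact (ih rest' hr' (i+2) tuples depth start s).2
          · by_cases hq : ch = '\''
            · have hs : skipQuoted (ch :: rest) i = (rest, i + 1) := by
                rw [skipQuoted.eq_def]; simp [hq]
              have h1 : loopA (ch :: rest) i tuples depth true false start s
                  = loopA rest (i+1) tuples depth false false start s := by
                rw [loopA.eq_def]; simp [hq]
              rw [h1, hs]
              exact (ih rest hr (i+1) tuples depth start s).1
            · have hs : skipQuoted (ch :: rest) i = skipQuoted rest (i + 1) := by
                rw [skipQuoted.eq_def]; simp [hq, hb]
              have h1 : loopA (ch :: rest) i tuples depth true false start s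
                  = loopA rest (i+1) tuples depth true false start s := by
                rw [loopA.eq_def]; simp [hq, hb]
              rw [h1, hs]
              exact (ih rest hr (i+1) tuples depth start s).2

-- ===== VERDICT (by name: the statement is the Claim_ definition above) =====
theorem split_tuples_spec : Claim_equal_split_tuples := by
  intro s _
  unfold Spec_split_tuples split_tuples split_tuples_alt
  exact (loopA_eq_loopB s.toList.length s.toList le_rfl 0 [] 0 none s).1
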